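-- pv_equiv track=rewrite | github.com/toantran980/Project-1-Sorting-Algorithms-and-Visualizer | output.py | radix_sort_visual
-- ===== SOURCE A (Python) =====
-- def radix_sort_visual(arr):
--     steps = []
--
--     def counting_sort(arr, exp):
--         n = len(arr)
--         output = [0] * n
--         count = [0] * 10
--
--         for i in range(n):
--             index = (arr[i] // exp) % 10
--             count[index] += 1
--
--         for i in range(1, 10):
--             count[i] += count[i - 1]
--
--         for i in range(n - 1, -1, -1):
--             index = (arr[i] // exp) % 10
--             output[count[index] - 1] = arr[i]
--             count[index] -= 1
--
--         for i in range(n):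
--             arr[i] = output[i]
--
--     if arr:
--         max_num = max(arr)
--         exp = 1
--
--         while max_num // exp > 0:
--             counting_sort(arr, exp)
--             steps.append(arr.copy())
--             exp *= 10
--
--     return steps
-- ===== SOURCE B (Python) =====
-- def radix_sort_visual(arr):
--     # Same digit-pass snapshots; each pass is a bucket concatenation instead of a counting sort.
--     # Mutates arr in place like the original (arr[:] = ...).
--     steps = []
--     if arr:
--         max_num = max(arr)
--         exp = 1
--         while max_num // exp > 0:
--             arr[:] = [x for d in range(10) for x in arr if x // exp % 10 == d]
--             steps.append(arr.copy())
--             exp *= 10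
--     return steps
-- ===== Notes on version B (the rewrite author's own statement) =====
-- stated objective: simpler
-- what changed: Each digit pass replaces the counting sort (digit histogram, prefix sums, backward placement into a preallocated output array) with a stable bucket concatenation: one comprehension that concatenates, for d = 0..9 in order, the elements whose current digit is d; the outer snapshot loop is unchanged.
import Mathlib
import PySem

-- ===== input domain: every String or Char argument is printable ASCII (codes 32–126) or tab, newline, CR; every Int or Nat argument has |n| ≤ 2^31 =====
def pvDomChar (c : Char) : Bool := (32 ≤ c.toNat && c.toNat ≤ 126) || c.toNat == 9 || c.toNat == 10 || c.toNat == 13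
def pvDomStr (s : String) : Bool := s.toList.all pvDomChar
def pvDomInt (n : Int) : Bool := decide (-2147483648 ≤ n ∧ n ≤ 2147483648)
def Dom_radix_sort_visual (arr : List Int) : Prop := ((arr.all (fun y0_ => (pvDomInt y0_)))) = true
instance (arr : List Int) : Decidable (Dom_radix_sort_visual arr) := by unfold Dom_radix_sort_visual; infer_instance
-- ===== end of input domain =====

-- B replaces A's per-digit counting sort by a stable bucket concatenation (simpler); both Pythons
-- mutate the argument list in place identically — the equivalence proved here is about the return value.

-- ===== PORT A =====
-- counting_sort(arr, exp): the three loops become folds over the same pyRange index lists.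
-- List indices are taken with .toNat: every index written/read is provably nonnegative and in
-- range on reachable states (digits lie in [0,10), count entries are positive when read), so
-- this is exact. The final copy loop `arr[i] = output[i]` makes arr = output; the pass returns output.
def pvCountingSortA (arr : List Int) (exp : Int) : List Int :=
  let n : Int := PySem.List.len arr
  let output : List Int := List.replicate arr.length (0 : Int)
  let count : List Int := List.replicate 10 (0 : Int)
  let count := (PySem.List.pyRange 0 n 1).foldl (fun c i =>
      let index := PySem.Int.mod (PySem.Int.floordiv (PySem.List.pyGetD arr i 0) exp) 10
      c.set index.toNat (c.getD index.toNat 0 + 1)) count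
  let count := (PySem.List.pyRange 1 10 1).foldl (fun c i =>
      c.set i.toNat (c.getD i.toNat 0 + c.getD (i - 1).toNat 0)) count
  let p := (PySem.List.pyRange (n - 1) (-1) (-1)).foldl (fun (s : List Int × List Int) i =>
      let index := PySem.Int.mod (PySem.Int.floordiv (PySem.List.pyGetD arr i 0) exp) 10
      ( s.1.set (s.2.getD index.toNat 0 - 1).toNat (PySem.List.pyGetD arr i 0),
        s.2.set index.toNat (s.2.getD index.toNat 0 - 1) )) (output, count)
  p.1

-- termination of the `while max_num // exp > 0` loop (exp grows tenfold each pass); cited by decreasing_by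
theorem pvFdivDec {m e : Int} (he : 0 < e) (h : 0 < PySem.Int.floordiv m e) :
    (PySem.Int.floordiv m (e * 10)).toNat < (PySem.Int.floordiv m e).toNat := by
  rw [PySem.Int.floordiv_eq_ediv_of_pos he] at h ⊢
  rw [PySem.Int.floordiv_eq_ediv_of_pos (by omega : (0:Int) < e * 10),
    ← Int.ediv_ediv_of_nonneg he.le]
  omega

def pvRadixLoopA (arr : List Int) (maxNum exp : Int) (steps : List (List Int))
    (he : 0 < exp) : List (List Int) :=
  if h : 0 < PySem.Int.floordiv maxNum exp then
    -- counting_sort mutates arr; steps.append(arr.copy()) appends the mutated list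
    pvRadixLoopA (pvCountingSortA arr exp) maxNum (exp * 10)
      (steps ++ [pvCountingSortA arr exp]) (by omega)
  else steps
termination_by (PySem.Int.floordiv maxNum exp).toNat
decreasing_by exact pvFdivDec he h

def radix_sort_visual (arr : List Int) : List (List Int) :=
  if arr.isEmpty then []
  else pvRadixLoopA arr ((PySem.List.max? arr id).getD 0) 1 [] (by omega)

-- ===== PORT B =====
-- one digit pass of B: `[x for d in range(10) for x in arr if x // exp % 10 == d]`
def pvBucketPassB (arr : List Int) (exp : Int) : List Int :=
  (PySem.List.pyRange 0 10 1).flatMap (fun d =>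
    arr.filter (fun x => PySem.Int.mod (PySem.Int.floordiv x exp) 10 == d))

def pvRadixLoopB (arr : List Int) (maxNum exp : Int) (steps : List (List Int))
    (he : 0 < exp) : List (List Int) :=
  if h : 0 < PySem.Int.floordiv maxNum exp then
    pvRadixLoopB (pvBucketPassB arr exp) maxNum (exp * 10)
      (steps ++ [pvBucketPassB arr exp]) (by omega)
  else steps
termination_by (PySem.Int.floordiv maxNum exp).toNat
decreasing_by exact pvFdivDec he h

def radix_sort_visual_alt (arr : List Int) : List (List Int) :=
  if arr.isEmpty then []
  else pvRadixLoopB arr ((PySem.List.max? arr id).getD 0) 1 [] (by omega)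

-- ===== PRECONDITION & SPEC =====
def Spec_radix_sort_visual (arr : List Int) (out : List (List Int)) : Prop := out = radix_sort_visual_alt arr
instance (arr : List Int) (out : List (List Int)) : Decidable (Spec_radix_sort_visual arr out) := by unfold Spec_radix_sort_visual; infer_instance

-- ===== CLAIM (what is proved, stated in full; the proofs are below) =====
def Claim_equal_radix_sort_visual : Prop := ∀ (arr : List Int), Dom_radix_sort_visual arr → Spec_radix_sort_visual arr (radix_sort_visual arr)

-- ===== LEMMAS AND PROOFS =====

-- the digit of x at the current pass, as a Nat
def pvDg (exp x : Int) : Nat := (PySem.Int.mod (PySem.Int.floordiv x exp) 10).toNat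
-- bucket k of arr, its size, and the offset of bucket k in the concatenation of buckets 0..k-1
def pvF (arr : List Int) (exp : Int) (k : Nat) : List Int := arr.filter (fun x => pvDg exp x == k)
def pvCnt (arr : List Int) (exp : Int) (k : Nat) : Nat := (pvF arr exp k).length
def pvOff (arr : List Int) (exp : Int) (k : Nat) : Nat := ((List.range k).map (pvCnt arr exp)).sum

theorem pvDg_lt (exp x : Int) : pvDg exp x < 10 := by
  have h1 := PySem.Int.mod_nonneg (PySem.Int.floordiv x exp) (by omega : (0:Int) < 10)
  have h2 := PySem.Int.mod_lt (PySem.Int.floordiv x exp) (by omega : (0:Int) < 10)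
  unfold pvDg; omega

theorem pvDg_cast (exp x : Int) :
    ((pvDg exp x : Nat) : Int) = PySem.Int.mod (PySem.Int.floordiv x exp) 10 := by
  have h1 := PySem.Int.mod_nonneg (PySem.Int.floordiv x exp) (by omega : (0:Int) < 10)
  unfold pvDg; omega

theorem pvOff_succ (arr : List Int) (exp : Int) (k : Nat) :
    pvOff arr exp (k + 1) = pvOff arr exp k + pvCnt arr exp k := by
  simp [pvOff, List.range_succ]

theorem pvOff_mono (arr : List Int) (exp : Int) {j k : Nat} (h : j ≤ k) :
    pvOff arr exp j ≤ pvOff arr exp k := by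
  induction k, h using Nat.le_induction with
  | base => exact le_rfl
  | succ k hk ih => rw [pvOff_succ]; omega

theorem pvCnt_split (arr : List Int) (exp : Int) (k : Nat) (i : Nat) :
    pvCnt arr exp k
      = ((arr.take i).filter (fun x => pvDg exp x == k)).length
        + ((arr.drop i).filter (fun x => pvDg exp x == k)).length := by
  rw [pvCnt, pvF]
  conv_lhs => rw [← List.take_append_drop i arr]
  rw [List.filter_append, List.length_append]

theorem pvGetD_set (l : List Int) (k j : Nat) (v : Int) (hk : k < l.length) :
    (l.set k v).getD j 0 = if j = k then v else l.getD j 0 := by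
  by_cases hj : j < l.length
  · rw [List.getD_eq_getElem _ _ (by simpa using hj), List.getD_eq_getElem _ _ hj,
      List.getElem_set]
    by_cases h : j = k
    · simp [h]
    · rw [if_neg (fun hh => h hh.symm), if_neg h]
  · have hlen : l.length ≤ j := by omega
    rw [List.getD_eq_default _ _ (by simpa using hlen), List.getD_eq_default _ _ hlen,
      if_neg (by omega)]

-- sum over range m of the per-element indicator
theorem pvIteSum (m d : Nat) (h : d < m) :
    ((List.range m).map (fun k => if d = k then 1 else 0)).sum = 1 := by
  induction m with
  | zero => omega
  | succ m ih =>
    rw [List.range_succ, List.map_append, List.sum_append]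
    rcases Nat.lt_or_ge d m with h' | h'
    · rw [ih h']; simp [show d ≠ m by omega]
    · have hd : d = m := by omega
      have hz : ((List.range m).map (fun k => if d = k then 1 else 0)).sum = 0 := by
        apply List.sum_eq_zero; intro x hx
        simp only [List.mem_map, List.mem_range] at hx
        obtain ⟨k, hk, rfl⟩ := hx
        rw [if_neg (by omega)]
      rw [hz, hd]; simp

theorem pvSumMapAdd (l : List Nat) (f g : Nat → Nat) :
    (l.map (fun k => f k + g k)).sum = (l.map f).sum + (l.map g).sum := by
  induction l with
  | nil => rfl
  | cons x l ih => simp [ih]; omega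


theorem pvCnt_cons (x : Int) (l : List Int) (exp : Int) (k : Nat) :
    pvCnt (x :: l) exp k = (if pvDg exp x = k then 1 else 0) + pvCnt l exp k := by
  by_cases h : pvDg exp x = k
  · simp [pvCnt, pvF, h]; omega
  · simp [pvCnt, pvF, h]

theorem pvOff_total (arr : List Int) (exp : Int) : pvOff arr exp 10 = arr.length := by
  induction arr with
  | nil =>
    have hz : ∀ k ∈ List.range 10, pvCnt [] exp k = 0 := fun k _ => by simp [pvCnt, pvF]
    rw [pvOff, List.map_congr_left hz]
    simp
  | cons x l ih =>
    have : pvOff (x :: l) exp 10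
        = ((List.range 10).map (fun k => if pvDg exp x = k then 1 else 0)).sum
          + pvOff l exp 10 := by
      rw [pvOff, pvOff, ← pvSumMapAdd]
      congr 1; apply List.map_congr_left; intro k _
      exact pvCnt_cons x l exp k
    rw [this, pvIteSum 10 _ (pvDg_lt exp x), ih]
    simp [Nat.add_comm]

-- ===== the counting loop =====
theorem pvCount1_aux (arr : List Int) (exp : Int) (m : Nat) (hm : m ≤ arr.length) :
    ((List.range m).foldl (fun c i =>
        c.set (pvDg exp (arr.getD i 0)) (c.getD (pvDg exp (arr.getD i 0)) 0 + 1))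
        (List.replicate 10 (0:Int))).length = 10
    ∧ ∀ k < 10, ((List.range m).foldl (fun c i =>
        c.set (pvDg exp (arr.getD i 0)) (c.getD (pvDg exp (arr.getD i 0)) 0 + 1))
        (List.replicate 10 (0:Int))).getD k 0 = (pvCnt (arr.take m) exp k : Int) := by
  induction m with
  | zero =>
    refine ⟨by simp, fun k hk => ?_⟩
    simp only [List.range_zero, List.foldl_nil, List.take_zero]
    have : pvCnt [] exp k = 0 := by simp [pvCnt, pvF]
    rw [this]
    interval_cases k <;> rfl
  | succ m ih =>
    obtain ⟨ihl, ihv⟩ := ih (by omega)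
    rw [List.range_succ, List.foldl_append]
    have hm' : m < arr.length := by omega
    have hgd : arr.getD m 0 = arr[m] := List.getD_eq_getElem arr 0 hm'
    have htake : arr.take (m+1) = arr.take m ++ [arr[m]] := by
      rw [List.take_add_one, List.getElem?_eq_getElem hm']
      rfl
    have hcnt : ∀ k, pvCnt (arr.take (m+1)) exp k
        = pvCnt (arr.take m) exp k + if pvDg exp arr[m] = k then 1 else 0 := by
      intro k
      rw [pvCnt, pvCnt, pvF, pvF, htake, List.filter_append, List.length_append]
      congr 1
      by_cases hh : pvDg exp arr[m] = k
      · have hb : (pvDg exp arr[m] == k) = true := by simpa using hh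
        rw [if_pos hh]; simp [List.filter, hb]
      · have hb : (pvDg exp arr[m] == k) = false := by simpa using hh
        rw [if_neg hh]; simp [List.filter, hb]
    simp only [List.foldl_cons, List.foldl_nil, hgd]
    refine ⟨by simpa using ihl, fun k hk => ?_⟩
    rw [pvGetD_set _ _ _ _ (by rw [ihl]; exact pvDg_lt _ _), hcnt k]
    by_cases hkd : k = pvDg exp arr[m]
    · rw [if_pos hkd, if_pos hkd.symm, ← hkd, ihv k hk]
      push_cast; ring
    · rw [if_neg hkd, if_neg (fun hh => hkd hh.symm), ihv k hk]
      push_cast; ring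

-- ===== the prefix-sum loop =====
theorem pvPrefix_aux (arr : List Int) (exp : Int) (c0 : List Int)
    (hlen : c0.length = 10) (hc : ∀ k < 10, c0.getD k 0 = (pvCnt arr exp k : Int)) (j : Nat) (hj : j ≤ 9) :
    ((List.range j).foldl (fun c i =>
        c.set (i+1) (c.getD (i+1) 0 + c.getD i 0)) c0).length = 10
    ∧ ∀ k < 10, ((List.range j).foldl (fun c i =>
        c.set (i+1) (c.getD (i+1) 0 + c.getD i 0)) c0).getD k 0
      = if k ≤ j then (pvOff arr exp (k+1) : Int) else (pvCnt arr exp k : Int) := by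
  induction j with
  | zero =>
    refine ⟨hlen, fun k hk => ?_⟩
    simp only [List.range_zero, List.foldl_nil]
    by_cases h0 : k = 0
    · subst h0
      rw [if_pos (le_refl 0), hc 0 (by omega), pvOff_succ]
      simp [pvOff]
    · rw [if_neg (by omega), hc k hk]
  | succ j ihj =>
    obtain ⟨ihl, ihv⟩ := ihj (by omega)
    rw [List.range_succ, List.foldl_append]
    simp only [List.foldl_cons, List.foldl_nil]
    refine ⟨by simpa using ihl, fun k hk => ?_⟩
    rw [pvGetD_set _ _ _ _ (by omega)]
    have hjv := ihv j (by omega)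
    rw [if_pos (le_refl j)] at hjv
    have hj1 := ihv (j+1) (by omega)
    rw [if_neg (by omega)] at hj1
    by_cases hkj : k = j + 1
    · rw [if_pos hkj, if_pos (by omega), hj1, hjv, hkj, pvOff_succ arr exp (j+1)]
      push_cast; ring
    · rw [if_neg hkj, ihv k hk]
      by_cases hk2 : k ≤ j
      · rw [if_pos hk2, if_pos (by omega)]
      · rw [if_neg hk2, if_neg (by omega)]

theorem pvGetD_append_right (l r : List Int) (t : Nat) :
    (l ++ r).getD (l.length + t) 0 = r.getD t 0 := by
  by_cases h : t < r.length
  · rw [List.getD_eq_getElem _ _ (by simp; omega), List.getD_eq_getElem _ _ h,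
      List.getElem_append_right (by omega)]
    congr 1
    omega
  · rw [List.getD_eq_default _ _ (by simp; omega), List.getD_eq_default _ _ (by omega)]

-- ===== the backward placement loop =====
theorem pvFill (arr : List Int) (exp : Int) :
    ∀ (i : Nat), i ≤ arr.length → ∀ (out c : List Int),
    out.length = arr.length → c.length = 10 →
    (∀ k < 10, c.getD k 0
        = (pvOff arr exp (k+1) : Int) - ((arr.drop i).filter (fun x => pvDg exp x == k)).length) →
    (∀ k < 10, ∀ t < pvCnt arr exp k,
        pvCnt arr exp k - ((arr.drop i).filter (fun x => pvDg exp x == k)).length ≤ t →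
        out.getD (pvOff arr exp k + t) 0 = (pvF arr exp k).getD t 0) →
    ((((List.range i).map (fun k : Nat => (k:Int))).reverse).foldl
        (fun (s : List Int × List Int) q =>
          (s.1.set (s.2.getD (pvDg exp (PySem.List.pyGetD arr q 0)) 0 - 1).toNat
              (PySem.List.pyGetD arr q 0),
           s.2.set (pvDg exp (PySem.List.pyGetD arr q 0))
              (s.2.getD (pvDg exp (PySem.List.pyGetD arr q 0)) 0 - 1))) (out, c)).1.length
      = arr.length
    ∧ ∀ k < 10, ∀ t < pvCnt arr exp k,
        ((((List.range i).map (fun k : Nat => (k:Int))).reverse).foldl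
          (fun (s : List Int × List Int) q =>
            (s.1.set (s.2.getD (pvDg exp (PySem.List.pyGetD arr q 0)) 0 - 1).toNat
                (PySem.List.pyGetD arr q 0),
             s.2.set (pvDg exp (PySem.List.pyGetD arr q 0))
                (s.2.getD (pvDg exp (PySem.List.pyGetD arr q 0)) 0 - 1))) (out, c)).1.getD
          (pvOff arr exp k + t) 0
          = (pvF arr exp k).getD t 0 := by
  intro i
  induction i with
  | zero =>
    intro _ out c hol hcl hc hout
    simp only [List.range_zero, List.map_nil, List.reverse_nil, List.foldl_nil]
    refine ⟨hol, fun k hk t ht => ?_⟩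
    have hfull : ((arr.drop 0).filter (fun x => pvDg exp x == k)).length = pvCnt arr exp k := by
      simp [pvCnt, pvF]
    exact hout k hk t ht (by omega)
  | succ i ihi =>
    intro hi1 out c hol hcl hc hout
    have hi : i < arr.length := by omega
    have hcons : ((List.range (i+1)).map (fun k : Nat => (k:Int))).reverse
        = (i : Int) :: ((List.range i).map (fun k : Nat => (k:Int))).reverse := by
      rw [List.range_succ, List.map_append, List.reverse_append]
      rfl
    have hget : PySem.List.pyGetD arr (i : Int) 0 = arr[i] := by
      rw [PySem.List.pyGetD_natCast]; exact List.getD_eq_getElem arr 0 hi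
    rw [hcons, List.foldl_cons]
    simp only [hget]
    set d := pvDg exp arr[i] with hd
    have hd10 : d < 10 := pvDg_lt exp arr[i]
    have hdrop : arr.drop i = arr[i] :: arr.drop (i+1) := List.drop_eq_getElem_cons hi
    have hfd : ((arr.drop i).filter (fun x => pvDg exp x == d)).length
        = ((arr.drop (i+1)).filter (fun x => pvDg exp x == d)).length + 1 := by
      rw [hdrop, List.filter_cons, if_pos (by simp [hd])]
      simp
    have hfk : ∀ k, k ≠ d → ((arr.drop i).filter (fun x => pvDg exp x == k)).length
        = ((arr.drop (i+1)).filter (fun x => pvDg exp x == k)).length := by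
      intro k hk
      rw [hdrop, List.filter_cons, if_neg (by simp [← hd]; omega)]
    have hsplit := pvCnt_split arr exp d i
    have hcnt_d : pvCnt arr exp d
        = ((arr.take i).filter (fun x => pvDg exp x == d)).length
          + ((arr.drop (i+1)).filter (fun x => pvDg exp x == d)).length + 1 := by
      rw [hsplit, hfd]
      omega
    have hoffd := pvOff_succ arr exp d
    have hofftot := pvOff_total arr exp
    have hoffmono := pvOff_mono arr exp (show d + 1 ≤ 10 by omega)
    have hcd := hc d hd10
    have hpos : (c.getD d 0 - 1).toNat
        = pvOff arr exp d + ((arr.take i).filter (fun x => pvDg exp x == d)).length := by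
      rw [hcd]; omega
    have hposlt : pvOff arr exp d
        + ((arr.take i).filter (fun x => pvDg exp x == d)).length < arr.length := by
      omega
    rw [hpos]
    apply ihi (by omega)
    · simp [hol]
    · simp [hcl]
    · -- the count invariant, one element earlier
      intro k hk
      rw [pvGetD_set c d k _ (by omega)]
      by_cases hkd : k = d
      · subst hkd
        rw [if_pos rfl, hcd, hfd]
        push_cast
        ring
      · rw [if_neg hkd, hc k hk, hfk k hkd]
    · -- the placement invariant, one element earlier
      intro k hk t ht hb
      rw [pvGetD_set out _ _ _ (by omega)]
      by_cases hkd : k = d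
      · subst hkd
        rw [hfd] at hb
        by_cases htT : t = ((arr.take i).filter (fun x => pvDg exp x == d)).length
        · rw [if_pos (by omega)]
          have hFd : pvF arr exp d
              = (arr.take i).filter (fun x => pvDg exp x == d)
                ++ arr[i] :: (arr.drop (i+1)).filter (fun x => pvDg exp x == d) := by
            rw [pvF]
            conv_lhs => rw [← List.take_append_drop i arr]
            rw [List.filter_append, hdrop, List.filter_cons, if_pos (by simp [hd])]
          rw [hFd, htT]
          simp
        · rw [if_neg (by omega)]
          exact hout d hd10 t ht (by omega)
      · have hne : pvOff arr exp k + t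
            ≠ pvOff arr exp d + ((arr.take i).filter (fun x => pvDg exp x == d)).length := by
          rcases Nat.lt_or_ge k d with h' | h'
          · have m1 := pvOff_succ arr exp k
            have m2 := pvOff_mono arr exp (show k + 1 ≤ d by omega)
            omega
          · have m1 := pvOff_mono arr exp (show d + 1 ≤ k by omega)
            omega
        rw [if_neg hne]
        exact hout k hk t ht (by rw [← hfk k hkd]; exact hb)

-- pyRange (n-1) (-1) (-1) is the reversed index list
theorem pvRangeDown (n : Nat) :
    PySem.List.pyRange ((n:Int) - 1) (-1) (-1)
      = ((List.range n).map (fun k : Nat => (k:Int))).reverse := by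
  have hcount : PySem.List.pyRange ((n:Int) - 1) (-1) (-1)
      = List.map (fun k => ((n:Int) - 1) + (-1) * ↑k) (List.range n) := by
    simp only [PySem.List.pyRange]
    norm_num
    by_cases hn : n = 0
    · subst hn; norm_num
    · rw [if_pos (by omega : 0 < n)]
  have hrev : ((List.range n).map (fun k : Nat => (k:Int))).reverse
      = List.map (fun k => ((n:Int) - 1) + (-1) * ↑k) (List.range n) := by
    apply List.ext_getElem (by simp)
    intro i h1 h2
    rw [List.getElem_reverse]
    simp only [List.length_map, List.length_range] at h1 h2 ⊢
    rw [List.getElem_map, List.getElem_map, List.getElem_range, List.getElem_range]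
    omega
  rw [hcount, hrev]

-- characterization of A's pass
theorem pvPassA_char (arr : List Int) (exp : Int) :
    (pvCountingSortA arr exp).length = arr.length
      ∧ ∀ k < 10, ∀ t < pvCnt arr exp k,
          (pvCountingSortA arr exp).getD (pvOff arr exp k + t) 0 = (pvF arr exp k).getD t 0 := by
  have hdg : ∀ x : Int, (PySem.Int.mod (PySem.Int.floordiv x exp) 10).toNat = pvDg exp x :=
    fun _ => rfl
  have h2 : PySem.List.pyRange 1 10 1 = List.map (fun k => (1:Int) + 1 * ↑k) (List.range 9) := by
    rw [PySem.List.pyRange_of_pos 1 10 (by omega)]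
    norm_num
    rfl
  have hidx : ∀ k : Nat, ((1:Int) + 1 * ↑k).toNat = k + 1 := fun k => by omega
  have hidx2 : ∀ k : Nat, ((1:Int) + 1 * ↑k - 1).toNat = k := fun k => by omega
  simp only [pvCountingSortA, PySem.List.len_eq, PySem.List.pyRange_zero_natCast,
    List.foldl_map, PySem.List.pyGetD_natCast, hdg, h2, hidx, hidx2, pvRangeDown]
  obtain ⟨h1l, h1v⟩ := pvCount1_aux arr exp arr.length (le_refl _)
  rw [List.take_length] at h1v
  obtain ⟨h2l, h2v⟩ := pvPrefix_aux arr exp _ h1l h1v 9 (by omega)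
  refine pvFill arr exp arr.length (le_refl _) _ _ (by simp) h2l ?_ ?_
  · intro k hk
    rw [List.drop_length]
    have := h2v k hk
    rw [if_pos (by omega)] at this
    simpa using this
  · intro k hk t ht hb
    rw [List.drop_length] at hb
    simp at hb
    omega

-- ===== the bucket concatenation =====
theorem pvNatBeqCast (a d : Nat) : ((a : Int) == (d : Int)) = (a == d) := by
  by_cases h : a = d
  · simp [h]
  · simp [h]

theorem pvBucketB_eq (arr : List Int) (exp : Int) :
    pvBucketPassB arr exp = (List.range 10).flatMap (pvF arr exp) := by
  unfold pvBucketPassB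
  rw [show PySem.List.pyRange 0 10 1 = List.map (fun k : Nat => (k:Int)) (List.range 10) from by
    rw [show (10:Int) = ((10:Nat):Int) from by norm_num, PySem.List.pyRange_zero_natCast],
    List.flatMap_map]
  have hfil : ∀ d : Nat,
      arr.filter (fun x => PySem.Int.mod (PySem.Int.floordiv x exp) 10 == (d : Int))
        = pvF arr exp d := by
    intro d
    unfold pvF
    congr 1
    funext x
    rw [← pvDg_cast exp x, pvNatBeqCast]
  rw [show (fun d : Nat =>
      arr.filter (fun x => PySem.Int.mod (PySem.Int.floordiv x exp) 10 == (d : Int)))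
      = pvF arr exp from funext hfil]

theorem pvB_length (arr : List Int) (exp : Int) (m : Nat) :
    ((List.range m).flatMap (pvF arr exp)).length = pvOff arr exp m := by
  induction m with
  | zero => simp [pvOff]
  | succ m ih => rw [List.range_succ, pvOff_succ]; simp [ih, pvCnt]

theorem pvB_getD (arr : List Int) (exp : Int) (m k t : Nat) (hk : k < m) (ht : t < pvCnt arr exp k) :
    ((List.range m).flatMap (pvF arr exp)).getD (pvOff arr exp k + t) 0
      = (pvF arr exp k).getD t 0 := by
  induction m with
  | zero => omega
  | succ m ih =>
    rw [List.range_succ, List.flatMap_append]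
    rcases Nat.lt_or_ge k m with h | h
    · have hlt : pvOff arr exp k + t < ((List.range m).flatMap (pvF arr exp)).length := by
        rw [pvB_length]
        have h1 := pvOff_succ arr exp k
        have h2 := pvOff_mono arr exp (show k + 1 ≤ m by omega)
        omega
      rw [List.getD_append _ _ _ _ hlt]
      exact ih h
    · have hk : k = m := by omega
      subst hk
      have hlen : pvOff arr exp k + t
          = ((List.range k).flatMap (pvF arr exp)).length + t := by rw [pvB_length]
      rw [hlen, List.flatMap_cons, List.flatMap_nil, List.append_nil, pvGetD_append_right]

theorem pvDecomp (arr : List Int) (exp : Int) (m p : Nat) (hp : p < pvOff arr exp m) :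
    ∃ k, k < m ∧ ∃ t, t < pvCnt arr exp k ∧ p = pvOff arr exp k + t := by
  induction m with
  | zero => simp [pvOff] at hp
  | succ m ih =>
    rw [pvOff_succ] at hp
    rcases Nat.lt_or_ge p (pvOff arr exp m) with h | h
    · obtain ⟨k, hk, t, ht, hpt⟩ := ih h
      exact ⟨k, by omega, t, ht, hpt⟩
    · exact ⟨m, by omega, p - pvOff arr exp m, by omega, by omega⟩

-- ===== the two passes agree =====
theorem pvPass_eq (arr : List Int) (exp : Int) :
    pvCountingSortA arr exp = pvBucketPassB arr exp := by
  obtain ⟨hAl, hAv⟩ := pvPassA_char arr exp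
  rw [pvBucketB_eq]
  have hBl : ((List.range 10).flatMap (pvF arr exp)).length = arr.length := by
    rw [pvB_length, pvOff_total]
  apply List.ext_getElem (by omega)
  intro p h1 h2
  have hp : p < pvOff arr exp 10 := by rw [pvOff_total]; omega
  obtain ⟨k, hk, t, ht, rfl⟩ := pvDecomp arr exp 10 p hp
  rw [← List.getD_eq_getElem _ 0 h1, ← List.getD_eq_getElem _ 0 h2,
    hAv k hk t ht, pvB_getD arr exp 10 k t hk ht]

-- ===== the outer loops agree =====
theorem pvLoop_eq (fuel : Nat) : ∀ (maxNum exp : Int) (arr : List Int) (steps : List (List Int))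
    (he : 0 < exp), (PySem.Int.floordiv maxNum exp).toNat ≤ fuel →
    pvRadixLoopA arr maxNum exp steps he = pvRadixLoopB arr maxNum exp steps he := by
  induction fuel with
  | zero =>
    intro maxNum exp arr steps he hf
    have hneg : ¬ 0 < PySem.Int.floordiv maxNum exp := by omega
    rw [pvRadixLoopA, pvRadixLoopB, dif_neg hneg, dif_neg hneg]
  | succ f ih =>
    intro maxNum exp arr steps he hf
    rw [pvRadixLoopA, pvRadixLoopB]
    by_cases h : 0 < PySem.Int.floordiv maxNum exp
    · rw [dif_pos h, dif_pos h, pvPass_eq]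
      exact ih maxNum (exp * 10) _ _ (by omega) (by have := pvFdivDec he h; omega)
    · rw [dif_neg h, dif_neg h]

-- ===== VERDICT (by name: the statement is the Claim_ definition above) =====
theorem radix_sort_visual_spec : Claim_equal_radix_sort_visual := by
  intro arr _
  unfold Spec_radix_sort_visual radix_sort_visual radix_sort_visual_alt
  by_cases h : arr.isEmpty
  · simp [h]
  · simp only [h]
    exact pvLoop_eq _ _ _ _ _ _ (le_refl _)
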